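-- pv_equiv track=rewrite | github.com/Haardik2510/ANALYSIS-AND-DESIGN-OF-ALGORITHMS-ASSIGNMENTS | lab3.py | suggest_friends
-- ===== SOURCE A (Python) =====
-- from collections import deque
--
-- def suggest_friends(adj, user):
--     visited=set([user]); q=deque([user]); level={user:0}
--     while q:
--         u=q.popleft()
--         for v in adj.get(u,[]):
--             if v not in visited:
--                 visited.add(v); level[v]=level[u]+1; q.append(v)
--     return {n for n,d in level.items() if d==2 and n not in adj.get(user,[])}
-- ===== SOURCE B (Python) =====
-- def suggest_friends(adj, user):
--     # BFS truncated at depth 2: scan only user's list and its neighbours' lists.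
--     direct = adj.get(user, [])
--     seen = {user}
--     level1 = []
--     for v in direct:
--         if v not in seen:
--             seen.add(v)
--             level1.append(v)
--     result = []
--     for v in level1:
--         for w in adj.get(v, []):
--             if w not in seen:
--                 seen.add(w)
--                 result.append(w)
--     return set(result)
-- ===== Notes on version B (the rewrite author's own statement) =====
-- stated objective: alternative
-- what changed: Replaced the full-graph BFS (which explores every reachable node, records a level dict, and then filters it for distance 2) by a BFS truncated at depth 2 that only scans adj[user] and the adjacency lists of user's direct neighbours; the trade is that B touches only the 2-neighbourhood while A traverses the whole reachable component.
import Mathlib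
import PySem

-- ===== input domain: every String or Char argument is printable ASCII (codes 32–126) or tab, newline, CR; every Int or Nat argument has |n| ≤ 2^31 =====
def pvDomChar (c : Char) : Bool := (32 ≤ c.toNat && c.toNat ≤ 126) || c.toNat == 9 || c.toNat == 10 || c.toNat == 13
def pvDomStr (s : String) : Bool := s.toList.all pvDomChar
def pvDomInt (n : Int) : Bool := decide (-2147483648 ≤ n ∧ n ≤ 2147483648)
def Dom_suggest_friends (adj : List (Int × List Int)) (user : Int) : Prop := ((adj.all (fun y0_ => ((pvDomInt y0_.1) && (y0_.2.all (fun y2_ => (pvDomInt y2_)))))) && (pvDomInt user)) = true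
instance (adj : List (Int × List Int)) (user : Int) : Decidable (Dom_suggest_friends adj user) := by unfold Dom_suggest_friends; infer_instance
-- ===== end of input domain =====

-- B truncates the BFS at depth 2 (it scans only adj[user] and the direct neighbours' lists)
-- instead of A's full-graph BFS followed by filtering the level dict for distance 2.

-- adj.get(u, [])  (both Pythons perform this same dict lookup)
def adjGet (adj : List (Int × List Int)) (u : Int) : List Int :=
  (PySem.Dict.mk adj).getD u []

-- ===== PORT A =====
-- body of A's inner 'for v in adj.get(u,[])' loop; state = (visited, q, level).
-- Python's 'level[u]' is ported as 'getD u 0': u is always a key of level when read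
-- (u was popped from q, and every enqueued node is entered into level).
def bfsStepA (u : Int) (st : PySem.Set Int × List Int × PySem.Dict Int Int) (v : Int) :
    PySem.Set Int × List Int × PySem.Dict Int Int :=
  if st.1.contains v then st
  else (st.1.add v, st.2.1 ++ [v], st.2.2.insert v (st.2.2.getD u 0 + 1))

-- A's 'while q' loop. fuel = 1 + total number of adjacency-list entries: each iteration
-- pops one queue element, and every enqueued node beyond 'user' is a distinct node found
-- in some adjacency list, so the queue empties before the fuel does.
def bfsA (adj : List (Int × List Int)) :
    Nat → PySem.Set Int → List Int → PySem.Dict Int Int → PySem.Dict Int Int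
  | 0, _, _, level => level
  | _ + 1, _, [], level => level
  | fuel + 1, visited, u :: q, level =>
      let st := (adjGet adj u).foldl (bfsStepA u) (visited, q, level)
      bfsA adj fuel st.1 st.2.1 st.2.2

def suggest_friends (adj : List (Int × List Int)) (user : Int) : List Int :=
  let fuel := adj.foldl (fun n p => n + p.2.length) 1
  let level := bfsA adj fuel (PySem.Set.ofList [user]) [user] (PySem.Dict.empty.insert user 0)
  PySem.Set.ofList
    ((level.items.filter (fun p => p.2 == 2 && !((adjGet adj user).contains p.1))).map (fun p => p.1))

-- ===== PORT B =====
-- body of B's 'if v not in seen: seen.add(v); acc.append(v)'; state = (seen, acc).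
def stepB (st : PySem.Set Int × List Int) (v : Int) : PySem.Set Int × List Int :=
  if st.1.contains v then st else (st.1.add v, st.2 ++ [v])

def suggest_friends_alt (adj : List (Int × List Int)) (user : Int) : List Int :=
  let p1 := (adjGet adj user).foldl stepB (PySem.Set.ofList [user], [])
  let p2 := p1.2.foldl (fun st v => (adjGet adj v).foldl stepB st) (p1.1, [])
  PySem.Set.ofList p2.2

-- ===== PRECONDITION & SPEC =====
def Spec_suggest_friends (adj : List (Int × List Int)) (user : Int) (out : List Int) : Prop := out = suggest_friends_alt adj user
instance (adj : List (Int × List Int)) (user : Int) (out : List Int) : Decidable (Spec_suggest_friends adj user out) := by unfold Spec_suggest_friends; infer_instance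

-- ===== CLAIM (what is proved, stated in full; the proofs are below) =====
def Claim_equal_suggest_friends : Prop := ∀ (adj : List (Int × List Int)) (user : Int), Dom_suggest_friends adj user → Spec_suggest_friends adj user (suggest_friends adj user)

-- ===== LEMMAS AND PROOFS =====

-- unfolding lemma for one iteration of A's while-loop
lemma bfsA_cons (adj : List (Int × List Int)) (fuel : Nat) (vis : PySem.Set Int)
    (u : Int) (q : List Int) (lev : PySem.Dict Int Int) :
    bfsA adj (fuel + 1) vis (u :: q) lev =
      bfsA adj fuel ((adjGet adj u).foldl (bfsStepA u) (vis, q, lev)).1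
        ((adjGet adj u).foldl (bfsStepA u) (vis, q, lev)).2.1
        ((adjGet adj u).foldl (bfsStepA u) (vis, q, lev)).2.2 := rfl

-- the sublist of l that a stepB-fold starting from seen-set vis appends
def news (vis : PySem.Set Int) : List Int → List Int
  | [] => []
  | v :: l => if vis.contains v then news vis l else v :: news (vis.add v) l

lemma foldl_stepB (l : List Int) (vis : PySem.Set Int) (acc : List Int) :
    l.foldl stepB (vis, acc) = (PySem.Set.update vis l, acc ++ news vis l) := by
  induction l generalizing vis acc with
  | nil => simp [news, PySem.Set.update]
  | cons v l ih =>
      by_cases h : vis.contains v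
      · have hm := (PySem.Set.contains_iff vis v).mp h
        simp only [List.foldl_cons, stepB, h, if_true, news,
          PySem.Set.update_cons, PySem.Set.add_of_mem hm]
        exact ih vis acc
      · simp only [List.foldl_cons, stepB, h, Bool.false_eq_true, if_false, news,
          PySem.Set.update_cons]
        rw [ih (vis.add v) (acc ++ [v])]
        simp

lemma mem_news {x : Int} : ∀ (l : List Int) (vis : PySem.Set Int),
    x ∈ news vis l → x ∈ l ∧ x ∉ vis := by
  intro l
  induction l with
  | nil => intro vis h; simp [news] at h
  | cons v l ih =>
      intro vis h
      simp only [news] at h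
      split_ifs at h with hc
      · exact ⟨List.mem_cons_of_mem _ (ih vis h).1, (ih vis h).2⟩
      · rcases List.mem_cons.mp h with rfl | h
        · exact ⟨List.mem_cons_self, fun hx => hc ((PySem.Set.contains_iff vis x).mpr hx)⟩
        · refine ⟨List.mem_cons_of_mem _ (ih _ h).1, fun hx => (ih _ h).2 ?_⟩
          exact (PySem.Set.mem_add vis v x).mpr (Or.inl hx)

lemma nodup_news : ∀ (l : List Int) (vis : PySem.Set Int), (news vis l).Nodup := by
  intro l
  induction l with
  | nil => intro vis; simp [news]
  | cons v l ih =>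
      intro vis
      simp only [news]
      split_ifs with hc
      · exact ih vis
      · refine List.nodup_cons.mpr ⟨fun h => ?_, ih _⟩
        exact (mem_news l _ h).2 ((PySem.Set.mem_add vis v v).mpr (Or.inr rfl))

lemma length_news : ∀ (l : List Int) (vis : PySem.Set Int), (news vis l).length ≤ l.length := by
  intro l
  induction l with
  | nil => intro vis; simp [news]
  | cons v l ih =>
      intro vis
      simp only [news]
      split_ifs with hc
      · exact Nat.le_succ_of_le (ih vis)
      · simpa using ih (vis.add v)

-- A's inner loop over l, characterised via news (same discoveries as a stepB-fold)
lemma foldl_bfsStepA (l : List Int) (vis : PySem.Set Int) (q : List Int)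
    (lev : PySem.Dict Int Int) (u : Int)
    (hu : u ∈ vis) (hk : ∀ k, lev.contains k = true → k ∈ vis) :
    l.foldl (bfsStepA u) (vis, q, lev)
      = (PySem.Set.update vis l, q ++ news vis l,
         (news vis l).foldl (fun L v => L.insert v (lev.getD u 0 + 1)) lev) := by
  induction l generalizing vis q lev with
  | nil => simp [news, PySem.Set.update]
  | cons v l ih =>
      by_cases h : vis.contains v
      · have hm := (PySem.Set.contains_iff vis v).mp h
        simp only [List.foldl_cons, bfsStepA, h, if_true, news, PySem.Set.update_cons,
          PySem.Set.add_of_mem hm]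
        exact ih vis q lev hu hk
      · have hvvis : v ∉ vis := fun hv => h ((PySem.Set.contains_iff vis v).mpr hv)
        have hvu : v ≠ u := fun hvu => hvvis (hvu ▸ hu)
        have hgd : (lev.insert v (lev.getD u 0 + 1)).getD u 0 = lev.getD u 0 :=
          PySem.Dict.getD_insert_of_ne lev _ 0 (Ne.symm hvu)
        simp only [List.foldl_cons, bfsStepA, h, Bool.false_eq_true, if_false, news,
          PySem.Set.update_cons]
        rw [ih (vis.add v) (q ++ [v]) (lev.insert v (lev.getD u 0 + 1))
              ((PySem.Set.mem_add vis v u).mpr (Or.inl hu))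
              (fun k hkk => by
                have hm := (PySem.Dict.contains_iff_mem_keys _ k).mp hkk
                rcases (PySem.Dict.mem_keys_insert lev v k _).mp hm with rfl | hm
                · exact (PySem.Set.mem_add vis k k).mpr (Or.inr rfl)
                · exact (PySem.Set.mem_add vis v k).mpr
                    (Or.inl (hk _ ((PySem.Dict.contains_iff_mem_keys lev k).mpr hm))))]
        rw [hgd]
        simp [List.append_assoc]

-- value table of the fresh-key insert fold
lemma getD_insertFold (ns : List Int) (lev : PySem.Dict Int Int) (c : Int)
    (hnd : lev.keys.Nodup) (hns : ns.Nodup)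
    (hfresh : ∀ v ∈ ns, lev.contains v = false) (k : Int) :
    (ns.foldl (fun L v => L.insert v c) lev).getD k 0 = if k ∈ ns then c else lev.getD k 0 := by
  have hitems : (ns.foldl (fun L v => L.insert v c) lev).items
      = lev.items ++ ns.map (fun v => (v, c)) := by
    have := PySem.Dict.items_foldl_insert_fresh ns (fun v => v) (fun _ => c) lev hfresh
      (by simpa using hns)
    simpa using this
  have hkeys : (ns.foldl (fun L v => L.insert v c) lev).keys = lev.keys ++ ns := by
    simp only [PySem.Dict.keys, hitems, List.map_append, List.map_map]
    simp [Function.comp_def]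
  have hknd : (ns.foldl (fun L v => L.insert v c) lev).keys.Nodup := by
    rw [hkeys]
    refine List.Nodup.append hnd hns ?_
    intro x hx hx'
    have h1 := (PySem.Dict.contains_iff_mem_keys lev x).mpr hx
    rw [hfresh x hx'] at h1
    exact absurd h1 (by simp)
  by_cases hmem : k ∈ ns
  · have hmi : (k, c) ∈ (ns.foldl (fun L v => L.insert v c) lev).items := by
      rw [hitems]; exact List.mem_append_right _ (List.mem_map.mpr ⟨k, hmem, rfl⟩)
    rw [PySem.Dict.getD_of_mem_items _ hmi hknd 0, if_pos hmem]
  · rw [if_neg hmem]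
    by_cases hc : lev.contains k = true
    · have hs : (lev.get? k).isSome = true := by
        have h := PySem.Dict.contains_eq_isSome_get? lev k
        rw [hc] at h
        exact h.symm
      obtain ⟨w, hw⟩ := Option.isSome_iff_exists.mp hs
      have hmi : (k, w) ∈ (ns.foldl (fun L v => L.insert v c) lev).items := by
        rw [hitems]; exact List.mem_append_left _ (PySem.Dict.mem_items_of_get?_eq_some lev hw)
      rw [PySem.Dict.getD_of_mem_items _ hmi hknd 0, PySem.Dict.getD_of_get?_eq_some lev 0 hw]
    · have hc' : lev.contains k = false := by simpa using hc
      have hc2 : (ns.foldl (fun L v => L.insert v c) lev).contains k = false := by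
        rw [← Bool.not_eq_true]
        intro hx
        have hmx := (PySem.Dict.contains_iff_mem_keys _ k).mp hx
        rw [hkeys] at hmx
        rcases List.mem_append.mp hmx with h | h
        · have := (PySem.Dict.contains_iff_mem_keys lev k).mpr h
          rw [hc'] at this
          exact absurd this (by simp)
        · exact hmem h
      rw [PySem.Dict.getD_of_not_contains _ 0 hc2, PySem.Dict.getD_of_not_contains _ 0 hc']

-- the result expression of A, as a function of the level dict
def filt2 (adj : List (Int × List Int)) (user : Int) (lev : PySem.Dict Int Int) : List Int :=
  (lev.items.filter (fun p => p.2 == 2 && !((adjGet adj user).contains p.1))).map (fun p => p.1)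

lemma filt2_insertFold_ne (adj : List (Int × List Int)) (user : Int)
    (ns : List Int) (lev : PySem.Dict Int Int) (c : Int)
    (hns : ns.Nodup) (hfresh : ∀ v ∈ ns, lev.contains v = false) (hc : c ≠ 2) :
    filt2 adj user (ns.foldl (fun L v => L.insert v c) lev) = filt2 adj user lev := by
  have hitems : (ns.foldl (fun L v => L.insert v c) lev).items
      = lev.items ++ ns.map (fun v => (v, c)) := by
    have := PySem.Dict.items_foldl_insert_fresh ns (fun v => v) (fun _ => c) lev hfresh
      (by simpa using hns)
    simpa using this
  simp [filt2, hitems, List.filter_append, List.filter_map, Function.comp_def, hc]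

lemma filt2_insertFold_two (adj : List (Int × List Int)) (user : Int)
    (ns : List Int) (lev : PySem.Dict Int Int)
    (hns : ns.Nodup) (hfresh : ∀ v ∈ ns, lev.contains v = false)
    (hdir : ∀ v ∈ ns, (adjGet adj user).contains v = false) :
    filt2 adj user (ns.foldl (fun L v => L.insert v (2 : Int)) lev) = filt2 adj user lev ++ ns := by
  have hitems : (ns.foldl (fun L v => L.insert v (2 : Int)) lev).items
      = lev.items ++ ns.map (fun v => (v, (2 : Int))) := by
    have := PySem.Dict.items_foldl_insert_fresh ns (fun v => v) (fun _ => (2:Int)) lev hfresh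
      (by simpa using hns)
    simpa using this
  simp only [filt2, hitems, List.filter_append, List.map_append]
  congr 1
  rw [List.filter_map]
  have hsel : ns.filter ((fun p : Int × Int => p.2 == 2 && !((adjGet adj user).contains p.1)) ∘
      (fun v => (v, (2 : Int)))) = ns := by
    apply List.filter_eq_self.mpr
    intro v hv
    have h := hdir v hv
    simp at h
    simp [h]
  rw [hsel, List.map_map]
  simp [Function.comp_def]

-- once every queued node has level ≥ 2, no further level-2 entries appear
lemma bfsA_ge2 (adj : List (Int × List Int)) (user : Int) :
    ∀ (fuel : Nat) (q : List Int) (vis : PySem.Set Int) (lev : PySem.Dict Int Int),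
    (∀ u ∈ q, u ∈ vis) → (∀ k, lev.contains k = true → k ∈ vis) → lev.keys.Nodup →
    (∀ u ∈ q, 2 ≤ lev.getD u 0) →
    filt2 adj user (bfsA adj fuel vis q lev) = filt2 adj user lev := by
  intro fuel
  induction fuel with
  | zero => intro q vis lev _ _ _ _; rfl
  | succ fuel ih =>
      intro q vis lev hq hk hnd hv
      cases q with
      | nil => rfl
      | cons u q =>
          have hu : u ∈ vis := hq u List.mem_cons_self
          rw [bfsA_cons, foldl_bfsStepA _ _ _ _ _ hu hk]
          dsimp only
          set l := adjGet adj u with hl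
          set ns := news vis l with hns
          set c := lev.getD u 0 + 1 with hcdef
          have hfresh : ∀ v ∈ ns, lev.contains v = false := by
            intro v hv'
            have hnv := (mem_news l vis hv').2
            rw [← Bool.not_eq_true]
            exact fun hcv => hnv (hk v hcv)
          have hnsnd : ns.Nodup := nodup_news l vis
          have hgd := getD_insertFold ns lev c hnd hnsnd hfresh
          have hc3 : 2 ≤ c := by
            have := hv u List.mem_cons_self
            omega
          have hitems : (ns.foldl (fun L v => L.insert v c) lev).items
              = lev.items ++ ns.map (fun v => (v, c)) := by
            have := PySem.Dict.items_foldl_insert_fresh ns (fun v => v) (fun _ => c) lev hfresh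
              (by simpa using hnsnd)
            simpa using this
          have hkeys : (ns.foldl (fun L v => L.insert v c) lev).keys = lev.keys ++ ns := by
            simp only [PySem.Dict.keys, hitems, List.map_append, List.map_map]
            simp [Function.comp_def]
          have hknd : (ns.foldl (fun L v => L.insert v c) lev).keys.Nodup := by
            rw [hkeys]
            refine List.Nodup.append hnd hnsnd ?_
            intro x hx hx'
            have h1 := (PySem.Dict.contains_iff_mem_keys lev x).mpr hx
            rw [hfresh x hx'] at h1
            exact absurd h1 (by simp)
          rw [ih (q ++ ns) (PySem.Set.update vis l) _
                (by
                  intro x hx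
                  rcases List.mem_append.mp hx with hx | hx
                  · exact (PySem.Set.mem_update vis l x).mpr
                      (Or.inl (hq x (List.mem_cons_of_mem _ hx)))
                  · exact (PySem.Set.mem_update vis l x).mpr (Or.inr (mem_news l vis hx).1))
                (by
                  intro k hkk
                  rw [PySem.Dict.contains_iff_mem_keys, hkeys] at hkk
                  rcases List.mem_append.mp hkk with hkk | hkk
                  · exact (PySem.Set.mem_update vis l k).mpr
                      (Or.inl (hk k ((PySem.Dict.contains_iff_mem_keys lev k).mpr hkk)))
                  · exact (PySem.Set.mem_update vis l k).mpr (Or.inr (mem_news l vis hkk).1))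
                hknd
                (by
                  intro x hx
                  rcases List.mem_append.mp hx with hx | hx
                  · have hxvis : x ∈ vis := hq x (List.mem_cons_of_mem _ hx)
                    have hxns : x ∉ ns := fun hxn => (mem_news l vis hxn).2 hxvis
                    rw [hgd x, if_neg hxns]
                    exact hv x (List.mem_cons_of_mem _ hx)
                  · rw [hgd x, if_pos hx]; exact hc3)]
          have hcne : c ≠ 2 := by
            have := hv u List.mem_cons_self
            omega
          exact filt2_insertFold_ne adj user ns lev c hnsnd hfresh hcne

-- B's phase-2 loop (over the level-1 list), characterised functionally
def outerRes (adj : List (Int × List Int)) : List Int → PySem.Set Int → List Int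
  | [], _ => []
  | v :: r, vis =>
      news vis (adjGet adj v) ++ outerRes adj r (PySem.Set.update vis (adjGet adj v))

def outerVis (adj : List (Int × List Int)) : List Int → PySem.Set Int → PySem.Set Int
  | [], vis => vis
  | v :: r, vis => outerVis adj r (PySem.Set.update vis (adjGet adj v))

lemma foldl_outerB (adj : List (Int × List Int)) :
    ∀ (r : List Int) (vis : PySem.Set Int) (acc : List Int),
    r.foldl (fun st v => (adjGet adj v).foldl stepB st) (vis, acc)
      = (outerVis adj r vis, acc ++ outerRes adj r vis) := by
  intro r
  induction r with
  | nil => intro vis acc; simp [outerVis, outerRes]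
  | cons v r ih =>
      intro vis acc
      simp only [List.foldl_cons, foldl_stepB, ih, outerVis, outerRes, List.append_assoc]

-- processing the level-1 queue: A's future level-2 entries are exactly B's phase-2 output
lemma bfsA_phase1 (adj : List (Int × List Int)) (user : Int) :
    ∀ (rest : List Int) (fuel : Nat) (vis : PySem.Set Int) (lev : PySem.Dict Int Int)
      (extra : List Int),
    rest.length ≤ fuel →
    (∀ u ∈ rest, u ∈ vis) → (∀ u ∈ extra, u ∈ vis) →
    (∀ k, lev.contains k = true → k ∈ vis) → lev.keys.Nodup →
    (∀ u ∈ rest, lev.getD u 0 = 1) → (∀ u ∈ extra, lev.getD u 0 = 2) →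
    (∀ v ∈ adjGet adj user, v ∈ vis) →
    filt2 adj user (bfsA adj fuel vis (rest ++ extra) lev)
      = filt2 adj user lev ++ outerRes adj rest vis := by
  intro rest
  induction rest with
  | nil =>
      intro fuel vis lev extra _ _ hextra hk hnd _ hex2 _
      simp only [List.nil_append, outerRes, List.append_nil]
      exact bfsA_ge2 adj user fuel extra vis lev hextra hk hnd
        (fun u hu => by rw [hex2 u hu])
  | cons u rest ih =>
      intro fuel vis lev extra hfuel hrest hextra hk hnd hr1 hex2 hdir
      cases fuel with
      | zero => simp at hfuel
      | succ fuel =>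
          have hu : u ∈ vis := hrest u List.mem_cons_self
          simp only [List.cons_append]
          rw [bfsA_cons, foldl_bfsStepA _ _ _ _ _ hu hk]
          dsimp only
          set l := adjGet adj u with hl
          set ns := news vis l with hnsdef
          have hgu : lev.getD u 0 + 1 = 2 := by rw [hr1 u List.mem_cons_self]; norm_num
          rw [hgu]
          have hfresh : ∀ v ∈ ns, lev.contains v = false := by
            intro v hv'
            have hnv := (mem_news l vis hv').2
            rw [← Bool.not_eq_true]
            exact fun hcv => hnv (hk v hcv)
          have hnsnd : ns.Nodup := nodup_news l vis
          have hgd := getD_insertFold ns lev 2 hnd hnsnd hfresh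
          have hitems : (ns.foldl (fun L v => L.insert v (2:Int)) lev).items
              = lev.items ++ ns.map (fun v => (v, (2:Int))) := by
            have := PySem.Dict.items_foldl_insert_fresh ns (fun v => v) (fun _ => (2:Int)) lev
              hfresh (by simpa using hnsnd)
            simpa using this
          have hkeys : (ns.foldl (fun L v => L.insert v (2:Int)) lev).keys = lev.keys ++ ns := by
            simp only [PySem.Dict.keys, hitems, List.map_append, List.map_map]
            simp [Function.comp_def]
          have hknd : (ns.foldl (fun L v => L.insert v (2:Int)) lev).keys.Nodup := by
            rw [hkeys]
            refine List.Nodup.append hnd hnsnd ?_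
            intro x hx hx'
            have h1 := (PySem.Dict.contains_iff_mem_keys lev x).mpr hx
            rw [hfresh x hx'] at h1
            exact absurd h1 (by simp)
          rw [show (rest ++ extra) ++ ns = rest ++ (extra ++ ns) from List.append_assoc _ _ _]
          rw [ih fuel (PySem.Set.update vis l) _ (extra ++ ns)
                (Nat.le_of_succ_le_succ (by simpa using hfuel))
                (fun x hx => (PySem.Set.mem_update vis l x).mpr
                  (Or.inl (hrest x (List.mem_cons_of_mem _ hx))))
                (by
                  intro x hx
                  rcases List.mem_append.mp hx with hx | hx
                  · exact (PySem.Set.mem_update vis l x).mpr (Or.inl (hextra x hx))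
                  · exact (PySem.Set.mem_update vis l x).mpr (Or.inr (mem_news l vis hx).1))
                (by
                  intro k hkk
                  rw [PySem.Dict.contains_iff_mem_keys, hkeys] at hkk
                  rcases List.mem_append.mp hkk with hkk | hkk
                  · exact (PySem.Set.mem_update vis l k).mpr
                      (Or.inl (hk k ((PySem.Dict.contains_iff_mem_keys lev k).mpr hkk)))
                  · exact (PySem.Set.mem_update vis l k).mpr (Or.inr (mem_news l vis hkk).1))
                hknd
                (by
                  intro x hx
                  have hxvis : x ∈ vis := hrest x (List.mem_cons_of_mem _ hx)
                  have hxns : x ∉ ns := fun hxn => (mem_news l vis hxn).2 hxvis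
                  rw [hgd x, if_neg hxns]
                  exact hr1 x (List.mem_cons_of_mem _ hx))
                (by
                  intro x hx
                  rcases List.mem_append.mp hx with hx | hx
                  · have hxvis : x ∈ vis := hextra x hx
                    have hxns : x ∉ ns := fun hxn => (mem_news l vis hxn).2 hxvis
                    rw [hgd x, if_neg hxns]
                    exact hex2 x hx
                  · rw [hgd x, if_pos hx])
                (fun v hv => (PySem.Set.mem_update vis l v).mpr (Or.inl (hdir v hv)))]
          rw [filt2_insertFold_two adj user ns lev hnsnd hfresh
                (by
                  intro v hv
                  have hnv := (mem_news l vis hv).2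
                  rw [← Bool.not_eq_true]
                  intro hcv
                  exact hnv (hdir v (by simpa using hcv)))]
          rw [show outerRes adj (u :: rest) vis
                = news vis (adjGet adj u) ++ outerRes adj rest
                    (PySem.Set.update vis (adjGet adj u)) from rfl, ← hl, ← hnsdef]
          simp [List.append_assoc]

-- fuel bookkeeping
lemma fold_len_ge (adj : List (Int × List Int)) : ∀ (n : Nat),
    n ≤ adj.foldl (fun m p => m + p.2.length) n := by
  induction adj with
  | nil => intro n; simp
  | cons p adj ih =>
      intro n
      calc n ≤ n + p.2.length := Nat.le_add_right _ _
        _ ≤ _ := ih _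

lemma adjGet_len_le (u : Int) : ∀ (adj : List (Int × List Int)) (n : Nat),
    (adjGet adj u).length + n ≤ adj.foldl (fun m p => m + p.2.length) n := by
  intro adj
  induction adj with
  | nil =>
      intro n
      have he : adjGet ([] : List (Int × List Int)) u = [] := rfl
      simp [he]
  | cons p adj ih =>
      intro n
      simp only [List.foldl_cons]
      have he : adjGet (p :: adj) u = if (p.1 == u) = true then p.2 else adjGet adj u := by
        obtain ⟨k, vs⟩ := p
        simp only [adjGet, PySem.Dict.getD_eq_get?_getD, PySem.Dict.get?_mk_cons]
        split <;> rfl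
      rw [he]
      by_cases h : (p.1 == u) = true
      · rw [if_pos h]
        calc p.2.length + n ≤ n + p.2.length := by omega
          _ ≤ _ := fold_len_ge adj _
      · rw [if_neg h]
        calc (adjGet adj u).length + n ≤ (adjGet adj u).length + (n + p.2.length) := by omega
          _ ≤ _ := ih _

-- ===== VERDICT (by name: the statement is the Claim_ definition above) =====
theorem suggest_friends_spec : Claim_equal_suggest_friends := by
  intro adj user _
  show PySem.Set.ofList
      (filt2 adj user
        (bfsA adj (adj.foldl (fun n p => n + p.2.length) 1)
          (PySem.Set.ofList [user]) [user] (PySem.Dict.empty.insert user 0)))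
    = suggest_friends_alt adj user
  unfold suggest_friends_alt
  dsimp only
  set F := adj.foldl (fun n p => n + p.2.length) 1 with hF
  have hF1 : 1 ≤ F := fold_len_ge adj 1
  have hFsucc : F = (F - 1) + 1 := by omega
  set vis0 : PySem.Set Int := PySem.Set.ofList [user] with hvis0
  have hvis0e : vis0 = [user] := rfl
  set lev0 : PySem.Dict Int Int := PySem.Dict.empty.insert user 0 with hlev0
  have hlev0items : lev0.items = [(user, 0)] := rfl
  have hlev0keys : lev0.keys = [user] := rfl
  set direct := adjGet adj user with hdirect
  -- first BFS iteration (pops user, discovers the level-1 nodes)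
  rw [hFsucc, bfsA_cons, foldl_bfsStepA direct vis0 [] lev0 user
        (by rw [hvis0e]; exact List.mem_cons_self)
        (by
          intro k hk
          rw [PySem.Dict.contains_iff_mem_keys, hlev0keys] at hk
          rw [hvis0e]; exact hk)]
  dsimp only
  have hgu0 : lev0.getD user 0 + 1 = 1 := by
    rw [hlev0, PySem.Dict.getD_insert_self]; norm_num
  rw [hgu0]
  set L1 := news vis0 direct with hL1
  set vis1 := PySem.Set.update vis0 direct with hvis1
  set lev1 := L1.foldl (fun L v => L.insert v (1 : Int)) lev0 with hlev1
  have hfresh0 : ∀ v ∈ L1, lev0.contains v = false := by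
    intro v hv
    have hnv := (mem_news direct vis0 hv).2
    rw [← Bool.not_eq_true]
    intro hcv
    rw [PySem.Dict.contains_iff_mem_keys, hlev0keys] at hcv
    apply hnv
    rw [hvis0e]
    exact hcv
  have hL1nd : L1.Nodup := nodup_news direct vis0
  have hitems1 : lev1.items = lev0.items ++ L1.map (fun v => (v, (1:Int))) := by
    have := PySem.Dict.items_foldl_insert_fresh L1 (fun v => v) (fun _ => (1:Int)) lev0
      hfresh0 (by simpa using hL1nd)
    simpa [hlev1] using this
  have hkeys1 : lev1.keys = user :: L1 := by
    simp only [PySem.Dict.keys, hitems1, List.map_append, List.map_map, hlev0items]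
    simp [Function.comp_def]
  have hnd1 : lev1.keys.Nodup := by
    rw [hkeys1]
    refine List.nodup_cons.mpr ⟨fun h => ?_, hL1nd⟩
    exact (mem_news direct vis0 h).2 (by rw [hvis0e]; exact List.mem_cons_self)
  have hgd1 := getD_insertFold L1 lev0 1 (by rw [hlev0keys]; simp) hL1nd hfresh0
  -- the rest of the BFS, via the phase-1 lemma
  rw [show ([] : List Int) ++ L1 = L1 ++ [] by simp]
  rw [bfsA_phase1 adj user L1 (F - 1) vis1 lev1 []
        (by
          calc L1.length ≤ direct.length := length_news direct vis0
            _ ≤ F - 1 := by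
                have h := adjGet_len_le user adj 1
                rw [← hdirect] at h
                omega)
        (fun x hx => (PySem.Set.mem_update vis0 direct x).mpr
          (Or.inr (mem_news direct vis0 hx).1))
        (by intro x hx; simp at hx)
        (by
          intro k hk
          rw [PySem.Dict.contains_iff_mem_keys, hkeys1] at hk
          rcases List.mem_cons.mp hk with rfl | hk
          · exact (PySem.Set.mem_update vis0 direct k).mpr
              (Or.inl (by rw [hvis0e]; exact List.mem_cons_self))
          · exact (PySem.Set.mem_update vis0 direct k).mpr
              (Or.inr (mem_news direct vis0 hk).1))
        hnd1
        (by
          intro x hx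
          rw [hlev1, hgd1 x, if_pos hx])
        (by intro x hx; simp at hx)
        (fun v hv => (PySem.Set.mem_update vis0 direct v).mpr (Or.inr hv))]
  -- A's filter of lev1 is empty (levels 0 and 1 only), so A's list is outerRes L1 vis1
  have hfilt1 : filt2 adj user lev1 = [] := by
    simp only [filt2, hitems1, hlev0items, List.filter_append, List.filter_map]
    simp
  rw [hfilt1, List.nil_append]
  -- B's side reduces to the same list
  rw [foldl_stepB direct vis0 []]
  dsimp only
  rw [List.nil_append, ← hL1, ← hvis1, foldl_outerB adj L1 vis1 [], List.nil_append]
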